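-- pv_equiv track=rewrite | github.com/BertRules/Global_reconstruction_of_language_models_with_linguistic_rules | rule/aspectrulemine.py | __get_term_pos_type_ant
-- ===== SOURCE A (Python) =====
-- def __get_term_pos_type_ant(term_pos_tags):
--     for t in term_pos_tags:
--         if t  == 'NO_ANT':
--             return 'NO_ANT'
--     for t in term_pos_tags:
--         if t != 'NO_ANT':
--             return t
--     return None
-- ===== SOURCE B (Python) =====
-- def __get_term_pos_type_ant(term_pos_tags):
--     # Single backwards pass with an absorbing accumulator: 'NO_ANT' dominates,
--     # otherwise the current tag overwrites, so the final value is the first tag.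
--     acc = None
--     for t in reversed(term_pos_tags):
--         acc = 'NO_ANT' if (t == 'NO_ANT' or acc == 'NO_ANT') else t
--     return acc
-- ===== Notes on version B (the rewrite author's own statement) =====
-- stated objective: alternative
-- what changed: Replaces A's two sequential forward scans with one backwards fold over a single absorbing accumulator ('NO_ANT' dominates, otherwise the current tag overwrites, so the final value is the first tag or None for empty input).
import Mathlib
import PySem

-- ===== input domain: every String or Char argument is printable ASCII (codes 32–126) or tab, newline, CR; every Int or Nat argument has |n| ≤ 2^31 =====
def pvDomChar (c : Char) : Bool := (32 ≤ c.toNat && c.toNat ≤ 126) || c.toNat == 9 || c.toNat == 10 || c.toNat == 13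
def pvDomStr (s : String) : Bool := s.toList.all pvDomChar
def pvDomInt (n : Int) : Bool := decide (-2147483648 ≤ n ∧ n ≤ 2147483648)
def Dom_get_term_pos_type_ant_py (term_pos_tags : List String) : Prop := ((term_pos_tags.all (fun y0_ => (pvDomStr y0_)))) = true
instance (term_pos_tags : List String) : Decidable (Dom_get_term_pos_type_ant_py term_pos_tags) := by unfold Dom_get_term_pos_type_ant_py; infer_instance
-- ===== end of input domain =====

-- B replaces A's two forward scans with one backwards fold over an absorbing accumulator (alternative decomposition, same cost).

-- ===== PORT A =====
-- first loop: return 'NO_ANT' on first match; second loop: return first tag ≠ 'NO_ANT'; else None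
def get_term_pos_type_ant_py (term_pos_tags : List String) : Option String :=
  match term_pos_tags.find? (fun t => t == "NO_ANT") with
  | some _ => some "NO_ANT"
  | none =>
    match term_pos_tags.find? (fun t => t != "NO_ANT") with
    | some t => some t
    | none => none

-- ===== PORT B =====
-- the loop body: acc = 'NO_ANT' if (t == 'NO_ANT' or acc == 'NO_ANT') else t
def pvStep (t : String) (acc : Option String) : Option String :=
  if t == "NO_ANT" || acc == some "NO_ANT" then some "NO_ANT" else some t

-- 'for t in reversed(term_pos_tags): acc = ...' starting from acc = None: a foldr
def get_term_pos_type_ant_py_alt (term_pos_tags : List String) : Option String :=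
  term_pos_tags.foldr pvStep none

-- ===== PRECONDITION & SPEC =====
def Spec_get_term_pos_type_ant_py (term_pos_tags : List String) (out : Option String) : Prop := out = get_term_pos_type_ant_py_alt term_pos_tags
instance (term_pos_tags : List String) (out : Option String) : Decidable (Spec_get_term_pos_type_ant_py term_pos_tags out) := by unfold Spec_get_term_pos_type_ant_py; infer_instance

-- ===== CLAIM (what is proved, stated in full; the proofs are below) =====
def Claim_equal_get_term_pos_type_ant_py : Prop := ∀ (term_pos_tags : List String), Dom_get_term_pos_type_ant_py term_pos_tags → Spec_get_term_pos_type_ant_py term_pos_tags (get_term_pos_type_ant_py term_pos_tags)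

-- ===== LEMMAS AND PROOFS =====
-- The accumulator ends as 'NO_ANT' exactly when some tag is 'NO_ANT'.
theorem pv_alt_noant (l : List String) :
    (get_term_pos_type_ant_py_alt l = some "NO_ANT") ↔ "NO_ANT" ∈ l := by
  induction l with
  | nil => simp [get_term_pos_type_ant_py_alt]
  | cons h t ih =>
    show pvStep h (get_term_pos_type_ant_py_alt t) = some "NO_ANT" ↔ _
    by_cases hh : h = "NO_ANT"
    · subst hh; simp [pvStep]
    · by_cases ha : get_term_pos_type_ant_py_alt t = some "NO_ANT"
      · rw [pvStep, ha]
        simp [List.mem_cons, ih.mp ha]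
      · have hmt : "NO_ANT" ∉ t := fun hmem => ha (ih.mpr hmem)
        have hcond : (h == "NO_ANT" || get_term_pos_type_ant_py_alt t == some "NO_ANT") = false := by
          simp [hh, ha]
        rw [pvStep, hcond]
        simp only [Bool.false_eq_true, if_false]
        constructor
        · intro hc; exact absurd (Option.some.inj hc) hh
        · intro hc
          rcases List.mem_cons.mp hc with e | e
          · exact absurd e.symm hh
          · exact absurd e hmt

theorem pv_eq (l : List String) :
    get_term_pos_type_ant_py l = get_term_pos_type_ant_py_alt l := by
  cases l with
  | nil => rfl
  | cons h t =>
    by_cases hh : h = "NO_ANT"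
    · subst hh
      have hA : get_term_pos_type_ant_py ("NO_ANT" :: t) = some "NO_ANT" := by
        simp [get_term_pos_type_ant_py, List.find?_cons_of_pos]
      have hB : get_term_pos_type_ant_py_alt ("NO_ANT" :: t) = some "NO_ANT" :=
        (pv_alt_noant _).mpr (List.mem_cons_self)
      rw [hA, hB]
    · by_cases hm : "NO_ANT" ∈ t
      · have hB : get_term_pos_type_ant_py_alt (h :: t) = some "NO_ANT" :=
          (pv_alt_noant (h :: t)).mpr (List.mem_cons_of_mem _ hm)
        have hfind : (h :: t).find? (fun t => t == "NO_ANT") ≠ none := fun hnone => by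
          have := (List.find?_eq_none.mp hnone) "NO_ANT" (List.mem_cons_of_mem _ hm)
          simp at this
        rcases Option.ne_none_iff_exists'.mp hfind with ⟨x, hx⟩
        simp only [get_term_pos_type_ant_py, hx, hB]
      · have hnot : "NO_ANT" ∉ h :: t := by
          intro hc
          rcases List.mem_cons.mp hc with e | e
          · exact hh e.symm
          · exact hm e
        have hn : (h :: t).find? (fun t => t == "NO_ANT") = none := by
          rw [List.find?_eq_none]
          intro x hx hbe
          exact hnot ((eq_of_beq hbe) ▸ hx)
        have hh' : (h != "NO_ANT") = true := by simp [hh]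
        have h2 : (h :: t).find? (fun t => t != "NO_ANT") = some h :=
          List.find?_cons_of_pos (h := hh')
        have hBne : get_term_pos_type_ant_py_alt t ≠ some "NO_ANT" :=
          fun hc => hm ((pv_alt_noant t).mp hc)
        have hcond : (h == "NO_ANT" || get_term_pos_type_ant_py_alt t == some "NO_ANT") = false := by
          simp [hh, hBne]
        have hB : get_term_pos_type_ant_py_alt (h :: t) = some h := by
          show pvStep h (get_term_pos_type_ant_py_alt t) = some h
          rw [pvStep, hcond]
          simp
        simp only [get_term_pos_type_ant_py, hn, h2, hB]

-- ===== VERDICT (by name: the statement is the Claim_ definition above) =====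
theorem get_term_pos_type_ant_py_spec : Claim_equal_get_term_pos_type_ant_py := by
  intro l _
  exact pv_eq l
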